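-- pv_equiv track=rewrite | github.com/pypi-data/pypi-mirror-373 | packages/torchsom/torchsom-1.1.1.tar.gz/torchsom-1.1.1/torchsom/utils/topology.py | get_hexagonal_offsets
-- ===== SOURCE A (Python) =====
-- def get_hexagonal_offsets(
--     neighborhood_order: int = 1,
-- ) -> dict[str, list[tuple[int, int]]]:
--     """Get neighbor offset coordinates for hexagonal topology at any order.
--
--     Order n has 6*n elements.
--
--     Args:
--         neighborhood_order (int, optional): Order of neighborhood ring. Defaults to 1.
--
--     Returns:
--         Dict[str, List[Tuple[int, int]]]: Offsets for even and odd rows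
--     """
--     if neighborhood_order < 1:
--         raise ValueError("Neighborhood order must be >= 1")
--
--     # Generate neighbors in axial coordinates using mathematical approach
--     def generate_axial_ring(distance: int) -> list[tuple[int, int]]:
--         """Generate all hexagonal neighbors at a specific distance in axial coordinates."""
--         if distance == 0:
--             return [(0, 0)]
--
--         neighbors = []
--         # Use cube coordinates for easier calculation
--         # Start at (distance, -distance, 0) and walk around the ring
--         x, y, z = distance, -distance, 0
--
--         # Six directions to walk around the hexagonal ring
--         directions = [
--             (0, 1, -1),  # NE
--             (-1, 1, 0),  # N
--             (-1, 0, 1),  # NW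
--             (0, -1, 1),  # SW
--             (1, -1, 0),  # S
--             (1, 0, -1),  # SE
--         ]
--
--         for direction in directions:
--             dx, dy, dz = direction
--             for _i in range(distance):
--                 # Convert cube back to axial (q, r)
--                 q = x
--                 r = y
--                 neighbors.append((q, r))
--
--                 # Move to next position along this edge
--                 x += dx
--                 y += dy
--                 z += dz
--
--         return neighbors
--
--     # Generate axial coordinates for this order
--     axial_neighbors = generate_axial_ring(neighborhood_order)
--
--     # Convert axial (q,r) to offset (x,y) coordinates for even and odd rows
--     even_offsets = []
--     odd_offsets = []
--     for q, r in axial_neighbors: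
--         even_col = q + (r + (r & 1)) // 2
--         even_row = r
--         even_offsets.append((even_row, even_col))
--         odd_col = q + (r - (r & 1)) // 2
--         odd_row = r
--         odd_offsets.append((odd_row, odd_col))
--
--     return {
--         "even": even_offsets,
--         "odd": odd_offsets,
--     }
-- ===== SOURCE B (Python) =====
-- def get_hexagonal_offsets(
--     neighborhood_order: int = 1,
-- ) -> dict[str, list[tuple[int, int]]]:
--     """Rotation-based ring: one seed edge, five successive 60-degree axial rotations;
--     odd offsets derived from even ones instead of recomputed."""
--     if neighborhood_order < 1:
--         raise ValueError("Neighborhood order must be >= 1")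
--     n = neighborhood_order
--     # First edge of the ring in axial coordinates: from (n,-n) heading NE.
--     edge = [(n, i - n) for i in range(n)]
--     ring = []
--     for _ in range(6):
--         ring.extend(edge)
--         # rotate the whole edge by 60 degrees counter-clockwise: (q,r) -> (-r, q+r)
--         edge = [(-r, q + r) for q, r in edge]
--     even = [(r, q + (r + r % 2) // 2) for q, r in ring]
--     # an odd row's column is the even one shifted left by one exactly on odd rows
--     odd = [(r, c - r % 2) for r, c in even]
--     return {"even": even, "odd": odd}
-- ===== Notes on version B (the rewrite author's own statement) =====
-- stated objective: alternative
-- what changed: Replaces the six-direction mutable (x,y,z) ring walk by a rotation construction: one seed edge is generated, then rotated 60 degrees five times to produce the other edges (no direction table, no running cube state), and the odd-row offsets are derived from the even-row ones by a one-column shift on odd rows instead of recomputed from axial coordinates.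
import Mathlib
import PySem

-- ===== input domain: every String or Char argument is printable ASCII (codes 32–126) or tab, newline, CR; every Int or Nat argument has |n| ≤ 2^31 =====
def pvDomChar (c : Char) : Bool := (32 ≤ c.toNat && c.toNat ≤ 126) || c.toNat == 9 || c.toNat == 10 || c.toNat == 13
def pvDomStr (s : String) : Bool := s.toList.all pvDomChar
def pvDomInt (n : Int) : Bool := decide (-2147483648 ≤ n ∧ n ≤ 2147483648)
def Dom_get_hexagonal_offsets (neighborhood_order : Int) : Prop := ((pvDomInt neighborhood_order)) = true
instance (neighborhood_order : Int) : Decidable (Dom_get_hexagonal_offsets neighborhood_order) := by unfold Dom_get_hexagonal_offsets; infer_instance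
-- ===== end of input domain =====

-- B builds the ring from one seed edge rotated 60° five times and derives the odd offsets
-- from the even ones; objective: alternative (same cost, different construction).

-- ===== PORT A =====
-- the inner helper generate_axial_ring: walks the ring with mutable cube state (x,y,z)
def pvA_ring (distance : Int) : List (Int × Int) :=
  if distance == 0 then [((0 : Int), (0 : Int))]
  else
    let directions : List (Int × Int × Int) :=
      [(0, 1, -1), (-1, 1, 0), (-1, 0, 1), (0, -1, 1), (1, -1, 0), (1, 0, -1)]
    let st :=
      directions.foldl (fun (s : Int × Int × Int × List (Int × Int)) dir =>
        (PySem.List.pyRange 0 distance 1).foldl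
          (fun (s2 : Int × Int × Int × List (Int × Int)) _ =>
            (s2.1 + dir.1, s2.2.1 + dir.2.1, s2.2.2.1 + dir.2.2,
             s2.2.2.2 ++ [(s2.1, s2.2.1)])) s)
        (distance, -distance, 0, [])
    st.2.2.2

def get_hexagonal_offsets (neighborhood_order : Int) : List (String × List (Int × Int)) :=
  if neighborhood_order < 1 then []   -- Python raises ValueError here; excluded by Pre_
  else
    let axial := pvA_ring neighborhood_order
    -- r & 1 is ported as PySem.Int.band r 1 (exact Python bitwise semantics)
    let eo :=
      axial.foldl (fun (acc : List (Int × Int) × List (Int × Int)) qr =>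
        (acc.1 ++ [(qr.2, qr.1 + PySem.Int.floordiv (qr.2 + PySem.Int.band qr.2 1) 2)],
         acc.2 ++ [(qr.2, qr.1 + PySem.Int.floordiv (qr.2 - PySem.Int.band qr.2 1) 2)]))
        ([], [])
    [("even", eo.1), ("odd", eo.2)]

-- ===== PORT B =====
def get_hexagonal_offsets_alt (neighborhood_order : Int) : List (String × List (Int × Int)) :=
  if neighborhood_order < 1 then []   -- Source B raises ValueError here; excluded by Pre_
  else
    let n := neighborhood_order
    -- seed edge, then 6 iterations of (extend ring; rotate edge by 60°)
    let edge0 : List (Int × Int) := (PySem.List.pyRange 0 n 1).map (fun i => (n, i - n))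
    let st :=
      (List.range 6).foldl
        (fun (s : List (Int × Int) × List (Int × Int)) _ =>
          (s.1 ++ s.2, s.2.map (fun qr => (-qr.2, qr.1 + qr.2))))
        ([], edge0)
    let ring := st.1
    let even := ring.map (fun qr => (qr.2, qr.1 + PySem.Int.floordiv (qr.2 + PySem.Int.mod qr.2 2) 2))
    let odd := even.map (fun rc => (rc.1, rc.2 - PySem.Int.mod rc.1 2))
    [("even", even), ("odd", odd)]

-- ===== PRECONDITION & SPEC =====
-- Python A raises ValueError for neighborhood_order < 1; exactly those inputs are excluded.
def Pre_get_hexagonal_offsets (neighborhood_order : Int) : Prop := 1 ≤ neighborhood_order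
instance (neighborhood_order : Int) : Decidable (Pre_get_hexagonal_offsets neighborhood_order) := by
  unfold Pre_get_hexagonal_offsets; infer_instance
def pvWitness_get_hexagonal_offsets : Int := 2

def Spec_get_hexagonal_offsets (neighborhood_order : Int) (out : List (String × List (Int × Int))) : Prop :=
  out = get_hexagonal_offsets_alt neighborhood_order
instance (neighborhood_order : Int) (out : List (String × List (Int × Int))) : Decidable (Spec_get_hexagonal_offsets neighborhood_order out) := by
  unfold Spec_get_hexagonal_offsets; infer_instance

-- ===== CLAIM (what is proved, stated in full; the proofs are below) =====
def Claim_equal_get_hexagonal_offsets : Prop := ∀ (neighborhood_order : Int), Dom_get_hexagonal_offsets neighborhood_order → Pre_get_hexagonal_offsets neighborhood_order → Spec_get_hexagonal_offsets neighborhood_order (get_hexagonal_offsets neighborhood_order)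

-- ===== LEMMAS AND PROOFS =====

-- A's inner edge loop, in closed form: after k blind steps from (x,y,z) the state has moved
-- k*dir and the points (x,y), (x+dx,y+dy), … have been appended.
theorem pvA_edge (dx dy dz : Int) (k : Nat) :
    ∀ (x y z : Int) (ns : List (Int × Int)),
    (List.range k).foldl
      (fun (s2 : Int × Int × Int × List (Int × Int)) (_ : Nat) =>
        (s2.1 + dx, s2.2.1 + dy, s2.2.2.1 + dz, s2.2.2.2 ++ [(s2.1, s2.2.1)]))
      (x, y, z, ns)
    = (x + k * dx, y + k * dy, z + k * dz,
       ns ++ (List.range k).map (fun i : Nat => (x + (i : Int) * dx, y + (i : Int) * dy))) := by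
  induction k with
  | zero => intro x y z ns; simp
  | succ k ih =>
    intro x y z ns
    simp only [List.range_succ, List.foldl_append, ih, List.foldl_cons, List.foldl_nil,
      List.map_append, List.map_cons, List.map_nil, List.append_assoc]
    push_cast
    ring_nf

-- A's walked ring equals B's rotated ring
theorem pvRing_eq (n : Int) (h : 1 ≤ n) :
    pvA_ring n =
      ((List.range 6).foldl
        (fun (s : List (Int × Int) × List (Int × Int)) _ =>
          (s.1 ++ s.2, s.2.map (fun qr => (-qr.2, qr.1 + qr.2))))
        ([], (PySem.List.pyRange 0 n 1).map (fun i => (n, i - n)))).1 := by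
  have hne : ¬ ((n == 0) = true) := by simp; omega
  have hr : PySem.List.pyRange 0 n 1 = (List.range n.toNat).map (fun k : Nat => (k : Int)) := by
    rw [PySem.List.pyRange_one]
    simp
  have hsix : List.range 6 = [0, 1, 2, 3, 4, 5] := by decide
  unfold pvA_ring
  simp only [hne, Bool.false_eq_true, if_false, hr, List.foldl_map, List.foldl_cons, List.foldl_nil,
    hsix, List.map_map]
  rw [pvA_edge, pvA_edge, pvA_edge, pvA_edge, pvA_edge, pvA_edge]
  have hk : ((n.toNat : Int)) = n := by omega
  simp only [hk, List.nil_append, List.append_assoc]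
  refine congrArg₂ (· ++ ·) ?_ (congrArg₂ (· ++ ·) ?_ (congrArg₂ (· ++ ·) ?_
    (congrArg₂ (· ++ ·) ?_ (congrArg₂ (· ++ ·) ?_ ?_))))
  all_goals
    apply List.map_congr_left
    intro i _
    simp only [Function.comp]
    try push_cast
    try ring_nf

-- per-point: B's shift of the even column equals A's odd-column formula
theorem pvOdd_point (q r : Int) :
    (r, q + PySem.Int.floordiv (r - PySem.Int.mod r 2) 2)
    = (r, q + PySem.Int.floordiv (r + PySem.Int.mod r 2) 2 - PySem.Int.mod r 2) := by
  have h2 : (0 : Int) < 2 := by norm_num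
  simp only [PySem.Int.floordiv_eq_ediv_of_pos h2, PySem.Int.mod_eq_emod_of_pos h2,
    Prod.mk.injEq, true_and]
  omega

-- ===== VERDICT (by name: the statement is the Claim_ definition above) =====
theorem get_hexagonal_offsets_spec : Claim_equal_get_hexagonal_offsets := by
  intro n _ hpre
  unfold Pre_get_hexagonal_offsets at hpre
  unfold Spec_get_hexagonal_offsets get_hexagonal_offsets get_hexagonal_offsets_alt
  have hlt : ¬ n < 1 := by omega
  simp only [hlt, if_false]
  rw [pvRing_eq n hpre]
  rw [PySem.List.foldl_prod_mk
        (f := fun (acc : List (Int × Int)) (qr : Int × Int) =>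
          acc ++ [(qr.2, qr.1 + PySem.Int.floordiv (qr.2 + PySem.Int.band qr.2 1) 2)])
        (g := fun (acc : List (Int × Int)) (qr : Int × Int) =>
          acc ++ [(qr.2, qr.1 + PySem.Int.floordiv (qr.2 - PySem.Int.band qr.2 1) 2)])]
  simp only [PySem.List.foldl_append_singleton_eq_map, PySem.Int.band_one, List.nil_append,
    List.map_map]
  refine congrArg₂ _ rfl (congrArg (fun l => [("odd", l)]) ?_)
  apply List.map_congr_left
  intro qr _
  simp only [Function.comp_apply]
  exact pvOdd_point qr.1 qr.2
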